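-- pv_equiv track=rewrite | github.com/echo313unfolding/krisper-vscode | compiler/bio_poetica.py | _detect_bio_action
-- ===== SOURCE A (Python) =====
-- from typing import Dict, List
--
-- def _detect_bio_action(tokens: List[str]) -> str:
--     """Detect biological action from code tokens"""
--     token_set = set(tokens)
--     if any(t in ['def', 'function', 'func'] for t in token_set):
--         return "grow"
--     elif any(t in ['return', 'yield'] for t in token_set):
--         return "bloom"
--     elif any(t in ['if', 'else', 'switch'] for t in token_set):
--         return "branch"
--     elif any(t in ['for', 'while', 'loop'] for t in token_set):
--         return "cycle"
--     else:
--         return "pulse"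
-- ===== SOURCE B (Python) =====
-- _TABLE = {
--     'def': (0, 'grow'), 'function': (0, 'grow'), 'func': (0, 'grow'),
--     'return': (1, 'bloom'), 'yield': (1, 'bloom'),
--     'if': (2, 'branch'), 'else': (2, 'branch'), 'switch': (2, 'branch'),
--     'for': (3, 'cycle'), 'while': (3, 'cycle'), 'loop': (3, 'cycle'),
-- }
--
-- def _detect_bio_action(tokens):
--     """Detect biological action from code tokens"""
--     best = None
--     for t in tokens:
--         hit = _TABLE.get(t)
--         if hit is not None and (best is None or hit[0] < best[0]):
--             best = hit
--     return best[1] if best is not None else "pulse"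
-- ===== Notes on version B (the rewrite author's own statement) =====
-- stated objective: alternative
-- what changed: Replaced the four ordered category-membership scans over a set with a single pass over the tokens against one precomputed keyword->(priority,label) table, keeping the smallest priority seen.
import Mathlib
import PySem

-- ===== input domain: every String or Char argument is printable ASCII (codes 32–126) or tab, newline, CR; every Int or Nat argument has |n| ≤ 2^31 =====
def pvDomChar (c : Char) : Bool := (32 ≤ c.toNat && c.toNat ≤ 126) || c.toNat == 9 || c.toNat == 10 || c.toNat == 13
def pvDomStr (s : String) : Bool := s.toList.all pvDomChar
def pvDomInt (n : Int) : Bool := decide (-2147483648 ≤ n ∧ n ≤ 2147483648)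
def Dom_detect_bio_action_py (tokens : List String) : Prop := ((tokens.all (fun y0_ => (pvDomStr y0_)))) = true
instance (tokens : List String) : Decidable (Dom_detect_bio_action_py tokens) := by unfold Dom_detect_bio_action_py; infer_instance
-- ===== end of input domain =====

-- B replaces A's four ordered category scans by one token pass against a keyword -> (priority, label) table (alternative decomposition, same cost).

-- ===== PORT A =====
def detect_bio_action_py (tokens : List String) : String :=
  let token_set : PySem.Set String := PySem.Set.ofList tokens
  if token_set.any (fun t => ["def", "function", "func"].contains t) then "grow"
  else if token_set.any (fun t => ["return", "yield"].contains t) then "bloom"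
  else if token_set.any (fun t => ["if", "else", "switch"].contains t) then "branch"
  else if token_set.any (fun t => ["for", "while", "loop"].contains t) then "cycle"
  else "pulse"

-- ===== PORT B =====
-- _TABLE: the dict literal has no duplicate keys, so first-match lookup on the
-- association list is exactly Python's _TABLE.get(t).
def bioTable : List (String × (Nat × String)) :=
  [("def", (0, "grow")), ("function", (0, "grow")), ("func", (0, "grow")),
   ("return", (1, "bloom")), ("yield", (1, "bloom")),
   ("if", (2, "branch")), ("else", (2, "branch")), ("switch", (2, "branch")),
   ("for", (3, "cycle")), ("while", (3, "cycle")), ("loop", (3, "cycle"))]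

-- _TABLE.get(t)
def bioGet (t : String) : Option (Nat × String) :=
  (bioTable.find? (fun p => p.1 == t)).map Prod.snd

def bioStep (best : Option (Nat × String)) (t : String) : Option (Nat × String) :=
  match bioGet t with
  | none => best
  | some hit =>
    match best with
    | none => some hit
    | some b => if hit.1 < b.1 then some hit else some b

def detect_bio_action_py_alt (tokens : List String) : String :=
  match tokens.foldl bioStep none with
  | some b => b.2
  | none => "pulse"

-- ===== PRECONDITION & SPEC =====
def Spec_detect_bio_action_py (tokens : List String) (out : String) : Prop := out = detect_bio_action_py_alt tokens
instance (tokens : List String) (out : String) : Decidable (Spec_detect_bio_action_py tokens out) := by unfold Spec_detect_bio_action_py; infer_instance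

-- ===== CLAIM (what is proved, stated in full; the proofs are below) =====
def Claim_equal_detect_bio_action_py : Prop := ∀ (tokens : List String), Dom_detect_bio_action_py tokens → Spec_detect_bio_action_py tokens (detect_bio_action_py tokens)

-- ===== LEMMAS AND PROOFS =====

-- priority of a single token (4 = no keyword)
def catP (t : String) : Nat := ((bioGet t).map Prod.fst).getD 4

def bioLab : Nat → String := fun p =>
  if p = 0 then "grow" else if p = 1 then "bloom" else if p = 2 then "branch"
  else if p = 3 then "cycle" else "pulse"

def bioAns : Nat → Option (Nat × String) := fun p => if p < 4 then some (p, bioLab p) else none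

def minP (ts : List String) : Nat := ts.foldr (fun t m => min (catP t) m) 4

theorem bioGet_char (t : String) (hit : Nat × String)
    (h : bioGet t = some hit) : hit.1 < 4 ∧ hit.2 = bioLab hit.1 := by
  simp only [bioGet, bioTable, List.find?_cons, List.find?_nil] at h
  repeat' split at h
  all_goals (try (cases h))
  all_goals (try exact ⟨by norm_num, by rfl⟩)

theorem catP_le (t : String) : catP t ≤ 4 := by
  unfold catP
  cases h : bioGet t with
  | none => simp
  | some hit => have := (bioGet_char t hit h).1; simp; omega

theorem bioStep_ans (p : Nat) (hp : p ≤ 4) (t : String) :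
    bioStep (bioAns p) t = bioAns (min p (catP t)) := by
  unfold bioStep catP
  cases h : bioGet t with
  | none =>
    simp [Nat.min_eq_left hp]
  | some hit =>
    obtain ⟨h1, h2⟩ := bioGet_char t hit h
    unfold bioAns
    by_cases hp4 : p < 4
    · simp only [if_pos hp4, Option.map_some, Option.getD_some]
      by_cases hlt : hit.1 < p
      · rw [if_pos hlt, Nat.min_eq_right (by omega), if_pos (by omega : hit.1 < 4)]
        have : hit = (hit.1, bioLab hit.1) := by
          cases hit; simp_all
        rw [← this]
      · rw [if_neg hlt, Nat.min_eq_left (by omega), if_pos hp4]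
    · have hp' : p = 4 := by omega
      subst hp'
      rw [if_neg (by omega : ¬ (4:Nat) < 4)]
      simp only [Option.map_some, Option.getD_some]
      rw [Nat.min_eq_right (by omega : hit.1 ≤ 4), if_pos h1]
      have : hit = (hit.1, bioLab hit.1) := by cases hit; simp_all
      rw [← this]

theorem minP_le (ts : List String) : minP ts ≤ 4 := by
  induction ts with
  | nil => simp [minP]
  | cons t ts ih => unfold minP at *; rw [List.foldr_cons]; omega

theorem loop_char (ts : List String) (p : Nat) (hp : p ≤ 4) :
    ts.foldl bioStep (bioAns p) = bioAns (min p (minP ts)) := by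
  induction ts generalizing p with
  | nil => simp [minP, Nat.min_eq_left hp]
  | cons t ts ih =>
    have hc := catP_le t
    rw [List.foldl_cons, bioStep_ans p hp t, ih (min p (catP t)) (by omega)]
    unfold minP
    rw [List.foldr_cons]
    have := minP_le ts
    congr 1
    unfold minP at this
    omega

theorem alt_char (ts : List String) : detect_bio_action_py_alt ts = bioLab (minP ts) := by
  unfold detect_bio_action_py_alt
  have h0 : (none : Option (Nat × String)) = bioAns 4 := by simp [bioAns]
  rw [h0, loop_char ts 4 (le_refl 4), Nat.min_eq_right (minP_le ts)]
  by_cases h : minP ts < 4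
  · simp [bioAns, h]
  · have : minP ts = 4 := by have := minP_le ts; omega
    simp [bioAns, this, bioLab]

-- catP characterized by category membership
theorem catP_eq_zero (t : String) : (catP t = 0) ↔ t ∈ (["def", "function", "func"] : List String) := by
  simp only [catP, bioGet, bioTable, List.find?_cons, List.find?_nil]
  repeat' split
  all_goals (try (rename_i hh; simp only [beq_iff_eq] at hh; subst hh; decide))
  all_goals (simp only [List.mem_cons, List.not_mem_nil, or_false]; constructor
             · intro hc; simp at hc
             · rintro (rfl | rfl | rfl) <;> simp_all)

theorem catP_eq_one (t : String) : (catP t = 1) ↔ t ∈ (["return", "yield"] : List String) := by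
  simp only [catP, bioGet, bioTable, List.find?_cons, List.find?_nil]
  repeat' split
  all_goals (try (rename_i hh; simp only [beq_iff_eq] at hh; subst hh; decide))
  all_goals (simp only [List.mem_cons, List.not_mem_nil, or_false]; constructor
             · intro hc; simp at hc
             · rintro (rfl | rfl) <;> simp_all)

theorem catP_eq_two (t : String) : (catP t = 2) ↔ t ∈ (["if", "else", "switch"] : List String) := by
  simp only [catP, bioGet, bioTable, List.find?_cons, List.find?_nil]
  repeat' split
  all_goals (try (rename_i hh; simp only [beq_iff_eq] at hh; subst hh; decide))
  all_goals (simp only [List.mem_cons, List.not_mem_nil, or_false]; constructor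
             · intro hc; simp at hc
             · rintro (rfl | rfl | rfl) <;> simp_all)

theorem catP_eq_three (t : String) : (catP t = 3) ↔ t ∈ (["for", "while", "loop"] : List String) := by
  simp only [catP, bioGet, bioTable, List.find?_cons, List.find?_nil]
  repeat' split
  all_goals (try (rename_i hh; simp only [beq_iff_eq] at hh; subst hh; decide))
  all_goals (simp only [List.mem_cons, List.not_mem_nil, or_false]; constructor
             · intro hc; simp at hc
             · rintro (rfl | rfl | rfl) <;> simp_all)

theorem any_ofList {p : String → Bool} (xs : List String) :
    (PySem.Set.ofList xs).any p = xs.any p := by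
  cases h : xs.any p with
  | true =>
    obtain ⟨x, hx, hpx⟩ := List.any_eq_true.mp h
    exact List.any_eq_true.mpr ⟨x, (PySem.Set.mem_ofList xs x).mpr hx, hpx⟩
  | false =>
    refine List.any_eq_false.mpr fun x hx => ?_
    exact List.any_eq_false.mp h x ((PySem.Set.mem_ofList xs x).mp hx)

theorem minP_cons (t : String) (ts : List String) : minP (t :: ts) = min (catP t) (minP ts) := rfl

theorem minP_le_iff (ts : List String) (k : Nat) (hk : k < 4) :
    minP ts ≤ k ↔ ∃ t ∈ ts, catP t ≤ k := by
  induction ts with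
  | nil => simp [minP]; omega
  | cons t ts ih =>
    rw [minP_cons, min_le_iff]
    constructor
    · rintro (h | h)
      · exact ⟨t, List.mem_cons_self, h⟩
      · obtain ⟨x, hx, hcx⟩ := ih.mp h
        exact ⟨x, List.mem_cons_of_mem t hx, hcx⟩
    · rintro ⟨x, hx, hcx⟩
      rcases List.mem_cons.mp hx with rfl | hx'
      · exact Or.inl hcx
      · exact Or.inr (ih.mpr ⟨x, hx', hcx⟩)

-- ===== VERDICT (by name: the statement is the Claim_ definition above) =====
theorem detect_bio_action_py_spec : Claim_equal_detect_bio_action_py := by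
  intro tokens _
  unfold Spec_detect_bio_action_py detect_bio_action_py
  rw [alt_char]
  simp only [any_ofList]
  split_ifs with ha0 ha1 ha2 ha3
  · obtain ⟨x, hx, hcx⟩ := List.any_eq_true.mp ha0
    have h0 : catP x = 0 := (catP_eq_zero x).mpr (by simpa using hcx)
    have hm : minP tokens = 0 :=
      Nat.le_zero.mp ((minP_le_iff tokens 0 (by omega)).mpr ⟨x, hx, by omega⟩)
    rw [hm]; rfl
  · obtain ⟨x, hx, hcx⟩ := List.any_eq_true.mp ha1
    have h1 : catP x = 1 := (catP_eq_one x).mpr (by simpa using hcx)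
    have hle : minP tokens ≤ 1 := (minP_le_iff tokens 1 (by omega)).mpr ⟨x, hx, by omega⟩
    have hne : minP tokens ≠ 0 := by
      intro h
      obtain ⟨y, hy, hcy⟩ := (minP_le_iff tokens 0 (by omega)).mp (by omega)
      have hmem := (catP_eq_zero y).mp (by omega)
      exact ha0 (List.any_eq_true.mpr ⟨y, hy, by simp [hmem]⟩)
    have hm : minP tokens = 1 := by omega
    rw [hm]; rfl
  · obtain ⟨x, hx, hcx⟩ := List.any_eq_true.mp ha2
    have h2 : catP x = 2 := (catP_eq_two x).mpr (by simpa using hcx)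
    have hle : minP tokens ≤ 2 := (minP_le_iff tokens 2 (by omega)).mpr ⟨x, hx, by omega⟩
    have hne1 : minP tokens ≠ 0 ∧ minP tokens ≠ 1 := by
      constructor <;> intro h
      · obtain ⟨y, hy, hcy⟩ := (minP_le_iff tokens 0 (by omega)).mp (by omega)
        have hmem := (catP_eq_zero y).mp (by omega)
        exact ha0 (List.any_eq_true.mpr ⟨y, hy, by simp [hmem]⟩)
      · obtain ⟨y, hy, hcy⟩ := (minP_le_iff tokens 1 (by omega)).mp (by omega)
        have hy01 : catP y = 0 ∨ catP y = 1 := by omega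
        rcases hy01 with h' | h'
        · have hmem := (catP_eq_zero y).mp h'
          exact ha0 (List.any_eq_true.mpr ⟨y, hy, by simp [hmem]⟩)
        · have hmem := (catP_eq_one y).mp h'
          exact ha1 (List.any_eq_true.mpr ⟨y, hy, by simp [hmem]⟩)
    have hm : minP tokens = 2 := by omega
    rw [hm]; rfl
  · obtain ⟨x, hx, hcx⟩ := List.any_eq_true.mp ha3
    have h3 : catP x = 3 := (catP_eq_three x).mpr (by simpa using hcx)
    have hle : minP tokens ≤ 3 := (minP_le_iff tokens 3 (by omega)).mpr ⟨x, hx, by omega⟩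
    have hne : minP tokens ≠ 0 ∧ minP tokens ≠ 1 ∧ minP tokens ≠ 2 := by
      refine ⟨?_, ?_, ?_⟩ <;> intro h
      all_goals
        obtain ⟨y, hy, hcy⟩ := (minP_le_iff tokens 2 (by omega)).mp (by omega)
      all_goals
        have hy012 : catP y = 0 ∨ catP y = 1 ∨ catP y = 2 := by omega
      all_goals
        rcases hy012 with h' | h' | h'
      all_goals first
        | (have hmem := (catP_eq_zero y).mp h'
           exact ha0 (List.any_eq_true.mpr ⟨y, hy, by simp [hmem]⟩))
        | (have hmem := (catP_eq_one y).mp h'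
           exact ha1 (List.any_eq_true.mpr ⟨y, hy, by simp [hmem]⟩))
        | (have hmem := (catP_eq_two y).mp h'
           exact ha2 (List.any_eq_true.mpr ⟨y, hy, by simp [hmem]⟩))
    have hm : minP tokens = 3 := by omega
    rw [hm]; rfl
  · have h4 := minP_le tokens
    have hm : minP tokens = 4 := by
      by_contra hne
      have hlt : minP tokens ≤ 3 := by omega
      obtain ⟨y, hy, hcy⟩ := (minP_le_iff tokens 3 (by omega)).mp hlt
      have hy' : catP y = 0 ∨ catP y = 1 ∨ catP y = 2 ∨ catP y = 3 := by omega
      rcases hy' with h' | h' | h' | h'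
      · have hmem := (catP_eq_zero y).mp h'
        exact ha0 (List.any_eq_true.mpr ⟨y, hy, by simp [hmem]⟩)
      · have hmem := (catP_eq_one y).mp h'
        exact ha1 (List.any_eq_true.mpr ⟨y, hy, by simp [hmem]⟩)
      · have hmem := (catP_eq_two y).mp h'
        exact ha2 (List.any_eq_true.mpr ⟨y, hy, by simp [hmem]⟩)
      · have hmem := (catP_eq_three y).mp h'
        exact ha3 (List.any_eq_true.mpr ⟨y, hy, by simp [hmem]⟩)
    rw [hm]; rfl
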